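-- pv_equiv track=rewrite | github.com/CodeCrow/adventofcode | 2024/05/script.py | create_rulebook
-- ===== SOURCE A (Python) =====
-- def create_rulebook(rules: list[str]) -> dict[any, set]:
--     rule_book = {}
--     for rule in rules:
--         index = rule.split("|")[1]
--         if r := rule_book.get(index):
--             r.add(rule.split("|")[0])
--         else:
--             rule_book[index] = {rule.split("|")[0]}
--     return rule_book
-- ===== SOURCE B (Python) =====
-- def create_rulebook(rules: list[str]) -> dict[any, set]:
--     # group-by decomposition: split once, list the distinct keys, then one pass per key
--     pairs = []
--     for rule in rules:
--         parts = rule.split("|")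
--         pairs.append((parts[0], parts[1]))
--     keys = list(dict.fromkeys(s for _, s in pairs))
--     book = {}
--     for k in keys:
--         book[k] = {f for f, s in pairs if s == k}
--     return book
-- ===== Notes on version B (the rewrite author's own statement) =====
-- stated objective: alternative
-- what changed: B replaces A's incremental dict-of-sets accumulation (get/add per rule) by a group-by decomposition: split every rule once into (first, second) pairs, dedup the second fields to get the key order, then build each key's set in one filtered pass over the pairs.
import Mathlib
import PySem

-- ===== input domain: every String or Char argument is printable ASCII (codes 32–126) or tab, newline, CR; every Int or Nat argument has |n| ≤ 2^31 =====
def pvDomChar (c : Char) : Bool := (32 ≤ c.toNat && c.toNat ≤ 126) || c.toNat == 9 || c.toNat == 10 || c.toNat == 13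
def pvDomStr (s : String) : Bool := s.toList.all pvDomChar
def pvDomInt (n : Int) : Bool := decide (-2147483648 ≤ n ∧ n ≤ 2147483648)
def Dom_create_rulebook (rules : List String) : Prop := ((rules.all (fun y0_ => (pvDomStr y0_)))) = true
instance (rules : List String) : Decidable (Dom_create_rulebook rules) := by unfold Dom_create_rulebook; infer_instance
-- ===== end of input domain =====

-- B builds the rulebook by a group-by decomposition (split once into pairs, dedup the keys,
-- one filtered pass per key) instead of A's incremental dict-of-sets accumulation; same result.

-- ===== PORT A =====
-- one step of A's loop body: index = rule.split("|")[1]; if r := book.get(index): r.add(first) else book[index] = {first}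
-- (parts[1] on a splitless rule raises IndexError in Python: the `_ => d` arm is unreachable under Pre_)
def pvStepA (d : PySem.Dict String (PySem.Set String)) (rule : String) :
    PySem.Dict String (PySem.Set String) :=
  match (PySem.Str.split? rule "|").getD [] with
  | first :: idx :: _ =>
    (match PySem.Dict.get? d idx with
     | some r =>
       if r.isEmpty then d.insert idx (PySem.Set.add PySem.Set.empty first)
       else d.insert idx (PySem.Set.add r first)
     | none => d.insert idx (PySem.Set.add PySem.Set.empty first))
  | _ => d

def create_rulebook (rules : List String) : List (String × List String) :=
  (rules.foldl pvStepA PySem.Dict.empty).items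

-- ===== PORT B =====
-- parts = rule.split("|"); (parts[0], parts[1])  (IndexError on a splitless rule: unreachable under Pre_)
def pvPair (rule : String) : Option (String × String) :=
  match (PySem.Str.split? rule "|").getD [] with
  | f :: s :: _ => some (f, s)
  | _ => none

def create_rulebook_alt (rules : List String) : List (String × List String) :=
  let pairs := rules.filterMap pvPair
  let keys := PySem.List.dedup (pairs.map (fun p => p.2))
  let book := keys.foldl (fun bk k =>
    bk.insert k (PySem.Set.ofList ((pairs.filter (fun p => p.2 == k)).map (fun p => p.1))))
    PySem.Dict.empty
  book.items

-- ===== PRECONDITION & SPEC =====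
-- Pre_ excludes exactly the rules without a "|" separator, on which A raises IndexError.
def Pre_create_rulebook (rules : List String) : Prop :=
  (rules.all (fun r => 2 ≤ ((PySem.Str.split? r "|").getD []).length)) = true
instance (rules : List String) : Decidable (Pre_create_rulebook rules) := by
  unfold Pre_create_rulebook; infer_instance
def pvWitness_create_rulebook : List String := ["47|53", "97|13", "97|53", "61|47"]

def Spec_create_rulebook (rules : List String) (out : List (String × List String)) : Prop := out = create_rulebook_alt rules
instance (rules : List String) (out : List (String × List String)) : Decidable (Spec_create_rulebook rules out) := by unfold Spec_create_rulebook; infer_instance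

-- ===== CLAIM (what is proved, stated in full; the proofs are below) =====
def Claim_equal_create_rulebook : Prop := ∀ (rules : List String), Dom_create_rulebook rules → Pre_create_rulebook rules → Spec_create_rulebook rules (create_rulebook rules)

-- ===== LEMMAS AND PROOFS =====

-- A's loop step over an already-extracted (first, second) pair
def pvStepP (d : PySem.Dict String (PySem.Set String)) (p : String × String) :
    PySem.Dict String (PySem.Set String) :=
  match PySem.Dict.get? d p.2 with
  | some r =>
    if r.isEmpty then d.insert p.2 (PySem.Set.add PySem.Set.empty p.1)
    else d.insert p.2 (PySem.Set.add r p.1)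
  | none => d.insert p.2 (PySem.Set.add PySem.Set.empty p.1)

lemma pvStepP_eq_insert (d : PySem.Dict String (PySem.Set String)) (p : String × String) :
    pvStepP d p = d.insert p.2 (PySem.Set.add (d.getD p.2 []) p.1) := by
  unfold pvStepP
  cases hg : PySem.Dict.get? d p.2 with
  | none => rw [PySem.Dict.getD_of_get?_eq_none d [] hg]; rfl
  | some r =>
    rw [PySem.Dict.getD_of_get?_eq_some d [] hg]
    cases r with
    | nil => rfl
    | cons a t => rfl

lemma pvGetD_foldl_stepP (ps : List (String × String)) (k : String) :
    (ps.foldl pvStepP PySem.Dict.empty).getD k [] =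
      PySem.Set.ofList ((ps.filter (fun p => p.2 == k)).map (fun p => p.1)) := by
  induction ps using List.reverseRecOn with
  | nil => rfl
  | append_singleton ps q ih =>
    rw [List.foldl_append, List.foldl_cons, List.foldl_nil, pvStepP_eq_insert,
        PySem.Dict.getD_insert, List.filter_append]
    by_cases hk : k = q.2
    · subst hk
      rw [if_pos rfl,
          show List.filter (fun p => p.2 == q.2) [q] = [q] from by
            simp only [List.filter_cons, List.filter_nil, beq_self_eq_true, if_pos],
          List.map_append, List.map_cons, List.map_nil,
          PySem.Set.ofList_append_singleton, ih]
    · have hqk : (q.2 == k) = false := beq_eq_false_iff_ne.mpr (fun h => hk h.symm)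
      rw [if_neg hk,
          show List.filter (fun p => p.2 == k) [q] = [] from by simp [hqk],
          List.append_nil, ih]

lemma pv_foldl_stepP_items (ps : List (String × String)) :
    (ps.foldl pvStepP PySem.Dict.empty).items =
      (PySem.Set.ofList (ps.map (fun p => p.2))).map
        (fun k => (k, PySem.Set.ofList ((ps.filter (fun p => p.2 == k)).map (fun p => p.1)))) := by
  have hfe : ps.foldl pvStepP PySem.Dict.empty =
      ps.foldl (fun d p => d.insert p.2 (PySem.Set.add (d.getD p.2 []) p.1)) PySem.Dict.empty :=
    PySem.List.foldl_congr_mem ps _ _ _ (fun d p _ => pvStepP_eq_insert d p)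
  have hkeys : (ps.foldl pvStepP PySem.Dict.empty).keys = PySem.Set.ofList (ps.map (fun p => p.2)) := by
    rw [hfe, PySem.Dict.keys_foldl_insert_key ps (fun p => p.2)
          (fun d p => PySem.Set.add (d.getD p.2 []) p.1) PySem.Dict.empty,
        show (PySem.Dict.empty : PySem.Dict String (PySem.Set String)).keys = [] from rfl,
        PySem.Set.update_nil_left]
  have hnd : (ps.foldl pvStepP PySem.Dict.empty).keys.Nodup := by
    rw [hfe]
    exact PySem.Dict.nodup_keys_foldl_insert_key ps (fun p => p.2) _ PySem.Dict.empty
      (by rw [show (PySem.Dict.empty : PySem.Dict String (PySem.Set String)).keys = [] from rfl]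
          exact List.nodup_nil)
  rw [PySem.Dict.items_eq_map_keys _ hnd [], hkeys]
  exact List.map_congr_left (fun k _ => by rw [pvGetD_foldl_stepP])

lemma pv_alt_eq (rules : List String) :
    create_rulebook_alt rules =
      ((PySem.List.dedup ((rules.filterMap pvPair).map (fun p => p.2))).foldl
        (fun bk k => bk.insert k (PySem.Set.ofList
          (((rules.filterMap pvPair).filter (fun p => p.2 == k)).map (fun p => p.1))))
        PySem.Dict.empty).items := rfl

lemma pv_a_eq (rules : List String) :
    create_rulebook rules = (rules.foldl pvStepA PySem.Dict.empty).items := rfl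

lemma pv_filterMap_some {α β : Type} (l : List α) (g : α → Option β) (f : α → β)
    (h : ∀ x ∈ l, g x = some (f x)) : l.filterMap g = l.map f := by
  rw [List.filterMap_congr (g := fun x => some (f x)) h,
      show (fun x => some (f x)) = some ∘ f from rfl, List.filterMap_eq_map]

-- ===== VERDICT (by name: the statement is the Claim_ definition above) =====
theorem create_rulebook_spec : Claim_equal_create_rulebook := by
  intro rules _ hpre
  unfold Spec_create_rulebook
  rw [pv_a_eq, pv_alt_eq]
  have hall : ∀ r ∈ rules, 2 ≤ ((PySem.Str.split? r "|").getD []).length := by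
    intro r hr
    exact of_decide_eq_true (List.all_eq_true.mp hpre r hr)
  have hsplit : ∀ r ∈ rules, ∃ a b t, (PySem.Str.split? r "|").getD [] = a :: b :: t := by
    intro r hr
    have h2 := hall r hr
    match hp : (PySem.Str.split? r "|").getD [] with
    | [] => rw [hp] at h2; simp at h2
    | [a] => rw [hp] at h2; simp at h2
    | a :: b :: t => exact ⟨a, b, t, rfl⟩
  -- under Pre_, every rule yields its (parts[0], parts[1]) pair
  have hpair : ∀ r ∈ rules, pvPair r =
      some (((PySem.Str.split? r "|").getD []).headI,
            (((PySem.Str.split? r "|").getD []).tail).headI) := by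
    intro r hr
    obtain ⟨a, b, t, hparts⟩ := hsplit r hr
    unfold pvPair
    rw [hparts]
    rfl
  have hpairs : rules.filterMap pvPair =
      rules.map (fun r => (((PySem.Str.split? r "|").getD []).headI,
                           (((PySem.Str.split? r "|").getD []).tail).headI)) :=
    pv_filterMap_some rules pvPair _ hpair
  -- A's fold over rules equals the pair-level fold over the extracted pairs
  have hA : rules.foldl pvStepA PySem.Dict.empty =
      (rules.map (fun r => (((PySem.Str.split? r "|").getD []).headI,
                            (((PySem.Str.split? r "|").getD []).tail).headI))).foldl
        pvStepP PySem.Dict.empty := by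
    rw [List.foldl_map]
    apply PySem.List.foldl_congr_mem
    intro d r hr
    obtain ⟨a, b, t, hparts⟩ := hsplit r hr
    unfold pvStepA pvStepP
    rw [hparts]
    rfl
  rw [hpairs, hA, pv_foldl_stepP_items,
      show PySem.List.dedup ((rules.map (fun r => (((PySem.Str.split? r "|").getD []).headI,
             (((PySem.Str.split? r "|").getD []).tail).headI))).map (fun p => p.2)) =
           PySem.Set.ofList ((rules.map (fun r => (((PySem.Str.split? r "|").getD []).headI,
             (((PySem.Str.split? r "|").getD []).tail).headI))).map (fun p => p.2)) from rfl,
      PySem.Dict.items_foldl_insert_fresh _ (fun k => k)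
        (fun k => PySem.Set.ofList (((rules.map (fun r => (((PySem.Str.split? r "|").getD []).headI,
          (((PySem.Str.split? r "|").getD []).tail).headI))).filter (fun p => p.2 == k)).map (fun p => p.1)))
        PySem.Dict.empty
        (fun a _ => rfl)
        (by simpa using PySem.Set.nodup_ofList ((rules.map (fun r =>
              (((PySem.Str.split? r "|").getD []).headI,
               (((PySem.Str.split? r "|").getD []).tail).headI))).map (fun p => p.2))),
      show (PySem.Dict.empty : PySem.Dict String (PySem.Set String)).items = [] from rfl,
      List.nil_append]
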